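-- pv_equiv track=rewrite | github.com/xoaninc/App-watch | scripts/populate_stop_connections.py | sort_lines
-- ===== SOURCE A (Python) =====
-- def is_metro_line(line: str) -> bool:
--     """Check if a line is a valid Metro line (1-12, L1-L12, L7B, L9B, L10B, or R)."""
--     line = line.strip()
--     # Metro lines: 1-12, L1-L12, R, and B variants (L7B, L9B, L10B)
--     if line == 'R':
--         return True
--     if line in ('L7B', 'L9B', 'L10B', '7B', '9B', '10B'):
--         return True
--     if line.isdigit() and 1 <= int(line) <= 12:
--         return True
--     if line.startswith('L') and line[1:].isdigit() and 1 <= int(line[1:]) <= 12: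
--         return True
--     return False
--
-- def is_ml_line(line: str) -> bool:
--     """Check if a line is a valid Metro Ligero line (1-4, ML1-ML4)."""
--     line = line.strip()
--     # ML lines: 1-4, ML1-ML4
--     if line.isdigit() and 1 <= int(line) <= 4:
--         return True
--     if line.startswith('ML') and line[2:].isdigit() and 1 <= int(line[2:]) <= 4:
--         return True
--     return False
--
-- def normalize_metro_line(line: str) -> str:
--     """Normalize metro line to have L prefix.
--
--     '1' -> 'L1', 'L1' -> 'L1', 'R' -> 'R', '7B' -> 'L7B', 'L7B' -> 'L7B'
--     Non-metro lines are filtered out in sort_lines when add_l_prefix=True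
--     """
--     line = line.strip()
--     # B variants without L prefix
--     if line in ('7B', '9B', '10B'):
--         return f'L{line}'
--     # If it's a plain number (Metro Madrid line), add L prefix
--     if line.isdigit() and 1 <= int(line) <= 12:
--         return f'L{line}'
--     return line
--
-- def normalize_ml_line(line: str) -> str:
--     """Normalize Metro Ligero line to have ML prefix.
--
--     '1' -> 'ML1', 'ML1' -> 'ML1'
--     """
--     line = line.strip()
--     # If it's a plain number (1-4), add ML prefix
--     if line.isdigit() and 1 <= int(line) <= 4:
--         return f'ML{line}'
--     return line
--
-- def sort_lines(lines: set, add_l_prefix: bool = False, add_ml_prefix: bool = False) -> str: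
--     """Sort lines: L-lines first (numerically), then ML-lines, then others.
--
--     Args:
--         lines: Set of line names
--         add_l_prefix: If True, filter to Metro lines only and add 'L' prefix
--         add_ml_prefix: If True, filter to ML lines only and add 'ML' prefix
--     """
--     if add_l_prefix:
--         # Filter to only Metro lines (1-12, L1-L12, R) and normalize
--         lines = {normalize_metro_line(x) for x in lines if is_metro_line(x)}
--     elif add_ml_prefix:
--         # Filter to only ML lines (1-4, ML1-ML4) and normalize
--         lines = {normalize_ml_line(x) for x in lines if is_ml_line(x)}
--
--     # Separate L-lines, ML-lines, R, and others
--     l_lines = []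
--     ml_lines = []
--     r_line = []
--     others = []
--
--     for line in lines:
--         if line.startswith('ML') and line[2:].isdigit():
--             ml_lines.append(line)
--         elif line.startswith('L') and line[1:].isdigit():
--             l_lines.append(line)
--         elif line == 'R':
--             r_line.append(line)
--         else:
--             others.append(line)
--
--     # Sort numerically
--     l_lines.sort(key=lambda x: int(x[1:]))
--     ml_lines.sort(key=lambda x: int(x[2:]))
--     others.sort()
--
--     return ', '.join(l_lines + ml_lines + r_line + others)
-- ===== SOURCE B (Python) =====
-- def _metro_norm(x):
--     """Fused filter+normalize for Metro mode: normalized name, or None if not a Metro line."""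
--     s = x.strip()
--     if s == 'R' or s in ('L7B', 'L9B', 'L10B'):
--         return s
--     if s in ('7B', '9B', '10B'):
--         return 'L' + s
--     if s.isdigit() and 1 <= int(s) <= 12:
--         return 'L' + s
--     if s.startswith('L') and s[1:].isdigit() and 1 <= int(s[1:]) <= 12:
--         return s
--     return None
--
-- def _ml_norm(x):
--     """Fused filter+normalize for Metro Ligero mode: normalized name, or None."""
--     s = x.strip()
--     if s.isdigit() and 1 <= int(s) <= 4:
--         return 'ML' + s
--     if s.startswith('ML') and s[2:].isdigit() and 1 <= int(s[2:]) <= 4: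
--         return s
--     return None
--
-- def _key(line):
--     if line.startswith('ML') and line[2:].isdigit():
--         return (1, int(line[2:]), '')
--     if line.startswith('L') and line[1:].isdigit():
--         return (0, int(line[1:]), '')
--     if line == 'R':
--         return (2, 0, '')
--     return (3, 0, line)
--
-- def sort_lines(lines: set, add_l_prefix: bool = False, add_ml_prefix: bool = False) -> str:
--     """One keyed sort over the fused-normalized pool (no four-bucket partition)."""
--     if add_l_prefix:
--         pool = dict.fromkeys(v for v in map(_metro_norm, lines) if v is not None)
--     elif add_ml_prefix:
--         pool = dict.fromkeys(v for v in map(_ml_norm, lines) if v is not None)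
--     else:
--         pool = lines
--     return ', '.join(sorted(pool, key=_key))
-- ===== Notes on version B (the rewrite author's own statement) =====
-- stated objective: alternative
-- what changed: B fuses each mode's filter-then-normalize helper pair into one Option-returning normalizer applied in a single filterMap pass, and replaces A's four-bucket partition with three separate sorts by ONE stable sort of the whole pool under a composite (rank, number, string) key.
-- outside the precondition, e.g. on sort_lines({'01', '1\t'}, True, False): A returns 'L01, L1', B returns 'L1, L01'
import Mathlib
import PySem

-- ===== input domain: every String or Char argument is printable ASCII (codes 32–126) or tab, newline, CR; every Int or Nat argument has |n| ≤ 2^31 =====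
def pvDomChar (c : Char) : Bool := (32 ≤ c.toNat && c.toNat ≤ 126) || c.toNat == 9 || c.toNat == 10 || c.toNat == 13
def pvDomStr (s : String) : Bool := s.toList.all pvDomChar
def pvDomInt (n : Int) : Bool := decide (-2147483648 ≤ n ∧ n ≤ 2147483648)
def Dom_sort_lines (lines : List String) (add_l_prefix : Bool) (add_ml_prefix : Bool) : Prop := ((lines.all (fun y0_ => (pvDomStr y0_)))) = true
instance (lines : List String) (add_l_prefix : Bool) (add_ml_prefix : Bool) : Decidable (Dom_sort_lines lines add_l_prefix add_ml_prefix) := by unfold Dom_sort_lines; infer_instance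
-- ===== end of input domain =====

-- B restructures the algorithm: the filter-then-map of A's two predicate/normalizer helper pairs
-- is fused into one Option-returning normalizer per mode (a filterMap), and the four-bucket
-- partition with three separate sorts is replaced by ONE stable keyed sort; same cost,
-- alternative decomposition (not claimed faster).
-- The Python argument `lines` is a set, modelled as a List String of its distinct elements.

-- ===== PORT A =====
-- Named condition/key helpers of A: the condition expressions of A's classification loop
-- ("line.startswith('ML') and line[2:].isdigit()", "int(line[1:])", …), named for readability.
def bML (line : String) : Bool :=
  PySem.Str.startswith line "ML" && PySem.Str.strIsdigit (PySem.Str.slice line (some 2) none)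
def bL (line : String) : Bool :=
  PySem.Str.startswith line "L" && PySem.Str.strIsdigit (PySem.Str.slice line (some 1) none)
-- kL line = int(line[1:])  (used only under bL, where int() cannot raise; getD 0 never fires there)
def kL (line : String) : Int := (PySem.Int.ofStr? (PySem.Str.slice line (some 1) none)).getD 0
-- kML line = int(line[2:]) (used only under bML)
def kML (line : String) : Int := (PySem.Int.ofStr? (PySem.Str.slice line (some 2) none)).getD 0

-- module helper: is_metro_line
def is_metro_line (line : String) : Bool :=
  let l := PySem.Str.strip line
  if l == "R" then true
  else if l == "L7B" || l == "L9B" || l == "L10B" || l == "7B" || l == "9B" || l == "10B" then true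
  else if PySem.Str.strIsdigit l && decide (1 ≤ (PySem.Int.ofStr? l).getD 0) && decide ((PySem.Int.ofStr? l).getD 0 ≤ 12) then true
  else if bL l && decide (1 ≤ kL l) && decide (kL l ≤ 12) then true
  else false

-- module helper: is_ml_line
def is_ml_line (line : String) : Bool :=
  let l := PySem.Str.strip line
  if PySem.Str.strIsdigit l && decide (1 ≤ (PySem.Int.ofStr? l).getD 0) && decide ((PySem.Int.ofStr? l).getD 0 ≤ 4) then true
  else if bML l && decide (1 ≤ kML l) && decide (kML l ≤ 4) then true
  else false

-- module helper: normalize_metro_line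
def normalize_metro_line (line : String) : String :=
  let l := PySem.Str.strip line
  if l == "7B" || l == "9B" || l == "10B" then "L" ++ l
  else if PySem.Str.strIsdigit l && decide (1 ≤ (PySem.Int.ofStr? l).getD 0) && decide ((PySem.Int.ofStr? l).getD 0 ≤ 12) then "L" ++ l
  else l

-- module helper: normalize_ml_line
def normalize_ml_line (line : String) : String :=
  let l := PySem.Str.strip line
  if PySem.Str.strIsdigit l && decide (1 ≤ (PySem.Int.ofStr? l).getD 0) && decide ((PySem.Int.ofStr? l).getD 0 ≤ 4) then "ML" ++ l
  else l

-- the body of A's `for line in lines:` loop: append `line` to the bucket its elif chain picks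
def pvLoopBodyA (acc : List String × List String × List String × List String) (line : String) :
    List String × List String × List String × List String :=
  if bML line then (acc.1, acc.2.1 ++ [line], acc.2.2.1, acc.2.2.2)
  else if bL line then (acc.1 ++ [line], acc.2.1, acc.2.2.1, acc.2.2.2)
  else if line == "R" then (acc.1, acc.2.1, acc.2.2.1 ++ [line], acc.2.2.2)
  else (acc.1, acc.2.1, acc.2.2.1, acc.2.2.2 ++ [line])

-- A: filter then normalize (two helpers per mode), then one pass classifying into four buckets,
-- sort three of them, concatenate, join.
def sort_lines (lines : List String) (add_l_prefix : Bool) (add_ml_prefix : Bool) : String :=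
  let ls : List String :=
    if add_l_prefix then PySem.Set.ofList ((lines.filter is_metro_line).map normalize_metro_line)
    else if add_ml_prefix then PySem.Set.ofList ((lines.filter is_ml_line).map normalize_ml_line)
    else lines
  -- for line in lines: append to one of l_lines / ml_lines / r_line / others
  let quad := ls.foldl pvLoopBodyA
    (([] : List String), ([] : List String), ([] : List String), ([] : List String))
  let l_lines := PySem.List.sorted quad.1 kL false
  let ml_lines := PySem.List.sorted quad.2.1 kML false
  let others := PySem.List.sorted quad.2.2.2 (fun x => x) false
  PySem.Str.join ", " (l_lines ++ ml_lines ++ quad.2.2.1 ++ others)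

-- ===== PORT B =====
-- B's _metro_norm: fused filter+normalize, some normalized name or none
def metro_norm? (x : String) : Option String :=
  let s := PySem.Str.strip x
  if s == "R" || s == "L7B" || s == "L9B" || s == "L10B" then some s
  else if s == "7B" || s == "9B" || s == "10B" then some ("L" ++ s)
  else if PySem.Str.strIsdigit s && decide (1 ≤ (PySem.Int.ofStr? s).getD 0) && decide ((PySem.Int.ofStr? s).getD 0 ≤ 12) then some ("L" ++ s)
  else if PySem.Str.startswith s "L" && PySem.Str.strIsdigit (PySem.Str.slice s (some 1) none)
      && decide (1 ≤ (PySem.Int.ofStr? (PySem.Str.slice s (some 1) none)).getD 0)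
      && decide ((PySem.Int.ofStr? (PySem.Str.slice s (some 1) none)).getD 0 ≤ 12) then some s
  else none

-- B's _ml_norm
def ml_norm? (x : String) : Option String :=
  let s := PySem.Str.strip x
  if PySem.Str.strIsdigit s && decide (1 ≤ (PySem.Int.ofStr? s).getD 0) && decide ((PySem.Int.ofStr? s).getD 0 ≤ 4) then some ("ML" ++ s)
  else if PySem.Str.startswith s "ML" && PySem.Str.strIsdigit (PySem.Str.slice s (some 2) none)
      && decide (1 ≤ (PySem.Int.ofStr? (PySem.Str.slice s (some 2) none)).getD 0)
      && decide ((PySem.Int.ofStr? (PySem.Str.slice s (some 2) none)).getD 0 ≤ 4) then some s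
  else none

-- B's _key(line): the Python tuple (rank, num, str)
def pvKeyTriple (line : String) : Int × Int × String :=
  if PySem.Str.startswith line "ML" && PySem.Str.strIsdigit (PySem.Str.slice line (some 2) none) then
    (1, (PySem.Int.ofStr? (PySem.Str.slice line (some 2) none)).getD 0, "")
  else if PySem.Str.startswith line "L" && PySem.Str.strIsdigit (PySem.Str.slice line (some 1) none) then
    (0, (PySem.Int.ofStr? (PySem.Str.slice line (some 1) none)).getD 0, "")
  else if line == "R" then (2, 0, "")
  else (3, 0, line)

-- Python compares tuples lexicographically; the Lex wrapper gives _key's tuple that order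
def pvKeyB (line : String) : Lex (Int × Lex (Int × String)) :=
  toLex ((pvKeyTriple line).1, toLex ((pvKeyTriple line).2.1, (pvKeyTriple line).2.2))

-- B: filterMap with the fused normalizer (dedup = dict.fromkeys insertion order),
-- then ONE keyed sort of everything, join.
def sort_lines_alt (lines : List String) (add_l_prefix : Bool) (add_ml_prefix : Bool) : String :=
  let pool : List String :=
    if add_l_prefix then PySem.Set.ofList (lines.filterMap metro_norm?)
    else if add_ml_prefix then PySem.Set.ofList (lines.filterMap ml_norm?)
    else lines
  PySem.Str.join ", " (PySem.List.sorted pool pvKeyB false)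

-- ===== PRECONDITION & SPEC =====
-- the filtered/normalized collection A actually sorts
def pvProcessed (lines : List String) (add_l_prefix : Bool) (add_ml_prefix : Bool) : List String :=
  if add_l_prefix then PySem.Set.ofList ((lines.filter is_metro_line).map normalize_metro_line)
  else if add_ml_prefix then PySem.Set.ofList ((lines.filter is_ml_line).map normalize_ml_line)
  else lines

-- Pre_ excludes inputs on which two distinct line names tie under the sort key (e.g. 'L7' vs
-- 'L07', or a duplicated entry): there Python's stable sort breaks the tie by set-iteration
-- (hash) order of A's set argument, which is run-dependent and not modelled; A's output is
-- accidental on them.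
def Pre_sort_lines (lines : List String) (add_l_prefix : Bool) (add_ml_prefix : Bool) : Prop :=
  (pvProcessed lines add_l_prefix add_ml_prefix).Pairwise (fun x y => pvKeyTriple x ≠ pvKeyTriple y)
instance (lines : List String) (add_l_prefix : Bool) (add_ml_prefix : Bool) : Decidable (Pre_sort_lines lines add_l_prefix add_ml_prefix) := by unfold Pre_sort_lines; infer_instance

def pvWitness_sort_lines : List String × Bool × Bool := (["L2", "L1", "R", "ML4", "X", "7B"], false, false)

def Spec_sort_lines (lines : List String) (add_l_prefix : Bool) (add_ml_prefix : Bool) (out : String) : Prop := out = sort_lines_alt lines add_l_prefix add_ml_prefix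
instance (lines : List String) (add_l_prefix : Bool) (add_ml_prefix : Bool) (out : String) : Decidable (Spec_sort_lines lines add_l_prefix add_ml_prefix out) := by unfold Spec_sort_lines; infer_instance

-- ===== CLAIM (what is proved, stated in full; the proofs are below) =====
def Claim_equal_sort_lines : Prop := ∀ (lines : List String) (add_l_prefix : Bool) (add_ml_prefix : Bool), Dom_sort_lines lines add_l_prefix add_ml_prefix → Pre_sort_lines lines add_l_prefix add_ml_prefix → Spec_sort_lines lines add_l_prefix add_ml_prefix (sort_lines lines add_l_prefix add_ml_prefix)

-- ===== LEMMAS AND PROOFS =====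

-- B's fused normalizers agree pointwise with A's filter/normalize helper pairs
set_option maxHeartbeats 4000000 in
lemma metro_norm?_eq (x : String) :
    metro_norm? x = if is_metro_line x then some (normalize_metro_line x) else none := by
  unfold metro_norm? is_metro_line normalize_metro_line bL kL
  generalize PySem.Str.strip x = s
  by_cases h1 : s = "R"; · subst h1; decide
  by_cases h2 : s = "L7B"; · subst h2; decide
  by_cases h3 : s = "L9B"; · subst h3; decide
  by_cases h4 : s = "L10B"; · subst h4; decide
  by_cases h5 : s = "7B"; · subst h5; decide
  by_cases h6 : s = "9B"; · subst h6; decide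
  by_cases h7 : s = "10B"; · subst h7; decide
  simp only [beq_iff_eq, Bool.or_eq_true, Bool.and_eq_true, decide_eq_true_eq]
  split_ifs <;> first | rfl | tauto

set_option maxHeartbeats 4000000 in
lemma ml_norm?_eq (x : String) :
    ml_norm? x = if is_ml_line x then some (normalize_ml_line x) else none := by
  unfold ml_norm? is_ml_line normalize_ml_line bML kML
  generalize PySem.Str.strip x = s
  simp only [Bool.and_eq_true, decide_eq_true_eq]
  split_ifs <;> first | rfl | tauto

-- hence B's filterMap is A's filter-then-map
lemma filterMap_eq_map_filter (f? : String → Option String) (p : String → Bool) (n : String → String)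
    (hpt : ∀ x, f? x = if p x then some (n x) else none) (l : List String) :
    l.filterMap f? = (l.filter p).map n := by
  induction l with
  | nil => rfl
  | cons x t ih =>
    by_cases hx : p x
    · simp [List.filterMap_cons, List.filter_cons, hpt x, hx, ih]
    · simp [List.filterMap_cons, List.filter_cons, hpt x, hx, ih]

-- B's inlined key, written with A's named conditions
lemma pvKeyB_def (x : String) :
    pvKeyB x = if bML x then toLex ((1 : Int), toLex (kML x, ""))
      else if bL x then toLex ((0 : Int), toLex (kL x, ""))
      else if x == "R" then toLex ((2 : Int), toLex ((0 : Int), ""))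
      else toLex ((3 : Int), toLex ((0 : Int), x)) := by
  unfold pvKeyB pvKeyTriple bML bL kML kL
  by_cases hm : PySem.Chars.startswith x.toList ['M', 'L'] = true ∧ PySem.Chars.strIsdigit (PySem.List.slice x.toList (some 2)) = true
  · simp [hm]
  · by_cases hl : PySem.Chars.startswith x.toList ['L'] = true ∧ PySem.Chars.strIsdigit (PySem.List.slice x.toList (some 1)) = true
    · simp [hm, hl]
    · by_cases hr : x = "R"
      · subst hr; rfl
      · simp [hm, hl, hr]

-- the Lex key determines the plain triple and conversely
lemma pvKeyB_ne_iff (x y : String) : pvKeyB x ≠ pvKeyB y ↔ pvKeyTriple x ≠ pvKeyTriple y := by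
  have hx : ∀ z : String, pvKeyB z
      = toLex ((pvKeyTriple z).1, toLex ((pvKeyTriple z).2.1, (pvKeyTriple z).2.2)) := by
    intro z; rfl
  rw [hx x, hx y]
  constructor
  · intro h he; exact h (by rw [he])
  · intro h he
    apply h
    have := toLex.injective he
    have h1 : (pvKeyTriple x).1 = (pvKeyTriple y).1 := congrArg Prod.fst this
    have h2 := toLex.injective (congrArg Prod.snd this)
    have h21 : (pvKeyTriple x).2.1 = (pvKeyTriple y).2.1 := congrArg Prod.fst h2
    have h22 : (pvKeyTriple x).2.2 = (pvKeyTriple y).2.2 := congrArg Prod.snd h2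
    exact Prod.ext h1 (Prod.ext h21 h22)

-- proof-only predicates: the elif chain of A's classification loop, made into four
-- mutually exclusive, exhaustive tests
def cL (x : String) : Bool := !bML x && bL x
def cR (x : String) : Bool := !bML x && !bL x && (x == "R")
def cO (x : String) : Bool := !bML x && !bL x && !(x == "R")

-- A's classification loop computes the four filters
lemma classify_eq (ps : List String) (l m r o : List String) :
    ps.foldl pvLoopBodyA (l, m, r, o)
    = (l ++ ps.filter cL, m ++ ps.filter bML, r ++ ps.filter cR, o ++ ps.filter cO) := by
  induction ps generalizing l m r o with
  | nil => simp
  | cons x t ih =>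
    by_cases hm : bML x
    · rw [List.foldl_cons, show pvLoopBodyA (l, m, r, o) x = (l, m ++ [x], r, o) from by
        simp [pvLoopBodyA, hm], ih]
      simp [cL, cR, cO, hm, List.filter_cons, List.append_assoc]
    · by_cases hl : bL x
      · rw [List.foldl_cons, show pvLoopBodyA (l, m, r, o) x = (l ++ [x], m, r, o) from by
          simp [pvLoopBodyA, hm, hl], ih]
        simp [cL, cR, cO, hm, hl, List.filter_cons, List.append_assoc]
      · by_cases hr : x == "R"
        · rw [List.foldl_cons, show pvLoopBodyA (l, m, r, o) x = (l, m, r ++ [x], o) from by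
            simp [pvLoopBodyA, hm, hl, hr], ih]
          simp [cL, cR, cO, hm, hl, hr, List.filter_cons, List.append_assoc]
        · rw [List.foldl_cons, show pvLoopBodyA (l, m, r, o) x = (l, m, r, o ++ [x]) from by
            simp [pvLoopBodyA, hm, hl, hr], ih]
          simp [cL, cR, cO, hm, hl, hr, List.filter_cons, List.append_assoc]

lemma count_filter_eq (p : String → Bool) (ps : List String) (a : String) :
    List.count a (ps.filter p) = if p a then List.count a ps else 0 := by
  induction ps with
  | nil => simp
  | cons x t ih =>
    by_cases hx : p x
    · by_cases hax : x == a
      · have : x = a := by simpa using hax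
        subst this
        simp [List.filter_cons, hx, List.count_cons, ih]
      · simp [List.filter_cons, hx, List.count_cons, hax, ih]
    · by_cases hax : x == a
      · have : x = a := by simpa using hax
        subst this
        simp [List.filter_cons, hx, List.count_cons, ih]
      · simp [List.filter_cons, hx, List.count_cons, hax, ih]

-- the four filters are a partition of ps
lemma partition_perm (ps : List String) :
    (ps.filter cL ++ ps.filter bML ++ ps.filter cR ++ ps.filter cO).Perm ps := by
  apply List.perm_iff_count.mpr
  intro a
  simp only [List.count_append, count_filter_eq]
  by_cases hm : bML a
  · simp [cL, cR, cO, hm]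
  · by_cases hl : bL a
    · simp [cL, cR, cO, hm, hl]
    · by_cases hr : a == "R"
      · simp [cL, cR, cO, hm, hl, hr]
      · simp [cL, cR, cO, hm, hl, hr]

-- key characterizations per category
lemma key_of_bML {x : String} (h : bML x = true) : pvKeyB x = toLex (1, toLex (kML x, "")) := by
  simp [pvKeyB_def, h]
lemma key_of_cL {x : String} (h : cL x = true) : pvKeyB x = toLex (0, toLex (kL x, "")) := by
  simp only [cL, Bool.and_eq_true, Bool.not_eq_true'] at h
  simp [pvKeyB_def, h.1, h.2]
lemma key_of_cR {x : String} (h : cR x = true) : pvKeyB x = toLex (2, toLex (0, "")) := by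
  simp only [cR, Bool.and_eq_true, Bool.not_eq_true'] at h
  simp [pvKeyB_def, h.1.1, h.1.2, h.2]
lemma key_of_cO {x : String} (h : cO x = true) : pvKeyB x = toLex (3, toLex (0, x)) := by
  simp only [cO, Bool.and_eq_true, Bool.not_eq_true'] at h
  simp [pvKeyB_def, h.1.1, h.1.2, h.2]

-- the central fact: B's single keyed sort equals A's bucket-wise sorts, concatenated
set_option maxHeartbeats 1000000 in
lemma sorted_split (ps : List String)
    (hps : ps.Pairwise (fun x y => pvKeyB x ≠ pvKeyB y)) :
    PySem.List.sorted ps pvKeyB false =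
      PySem.List.sorted (ps.filter cL) kL false
      ++ PySem.List.sorted (ps.filter bML) kML false
      ++ ps.filter cR
      ++ PySem.List.sorted (ps.filter cO) (fun x => x) false := by
  have hSL := PySem.List.sorted_perm (ps.filter cL) kL false
  have hSM := PySem.List.sorted_perm (ps.filter bML) kML false
  have hSO := PySem.List.sorted_perm (ps.filter cO) (fun x => x) false
  -- permutation
  have hperm : (PySem.List.sorted (ps.filter cL) kL false
      ++ PySem.List.sorted (ps.filter bML) kML false
      ++ ps.filter cR
      ++ PySem.List.sorted (ps.filter cO) (fun x => x) false).Perm ps := by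
    refine List.Perm.trans ?_ (partition_perm ps)
    exact ((hSL.append hSM).append (List.Perm.refl _)).append hSO
  -- pairwise-distinct keys within each bucket
  have hsymm : ∀ {x y : String}, pvKeyB x ≠ pvKeyB y → pvKeyB y ≠ pvKeyB x :=
    fun h => Ne.symm h
  have hneL : (PySem.List.sorted (ps.filter cL) kL false).Pairwise (fun x y => pvKeyB x ≠ pvKeyB y) :=
    (hSL.pairwise_iff hsymm).mpr (hps.sublist List.filter_sublist)
  have hneM : (PySem.List.sorted (ps.filter bML) kML false).Pairwise (fun x y => pvKeyB x ≠ pvKeyB y) :=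
    (hSM.pairwise_iff hsymm).mpr (hps.sublist List.filter_sublist)
  have hneR : (ps.filter cR).Pairwise (fun x y => pvKeyB x ≠ pvKeyB y) :=
    hps.sublist List.filter_sublist
  have hneO : (PySem.List.sorted (ps.filter cO) (fun x => x) false).Pairwise (fun x y => pvKeyB x ≠ pvKeyB y) :=
    (hSO.pairwise_iff hsymm).mpr (hps.sublist List.filter_sublist)
  -- membership facts
  have memL : ∀ {x}, x ∈ PySem.List.sorted (ps.filter cL) kL false → cL x = true := fun hx =>
    (List.mem_filter.mp ((PySem.List.mem_sorted _ _ _ _).mp hx)).2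
  have memM : ∀ {x}, x ∈ PySem.List.sorted (ps.filter bML) kML false → bML x = true := fun hx =>
    (List.mem_filter.mp ((PySem.List.mem_sorted _ _ _ _).mp hx)).2
  have memR : ∀ {x}, x ∈ ps.filter cR → cR x = true := fun hx => (List.mem_filter.mp hx).2
  have memO : ∀ {x}, x ∈ PySem.List.sorted (ps.filter cO) (fun x => x) false → cO x = true := fun hx =>
    (List.mem_filter.mp ((PySem.List.mem_sorted _ _ _ _).mp hx)).2
  -- strict pairwise per bucket
  have pwL : (PySem.List.sorted (ps.filter cL) kL false).Pairwise (fun a b => pvKeyB a < pvKeyB b) := by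
    have hle := PySem.List.sorted_pairwise (ps.filter cL) kL
    refine List.Pairwise.imp_of_mem ?_ (hle.and hneL)
    intro a b ha hb h
    obtain ⟨hab, hne⟩ := h
    rw [key_of_cL (memL ha), key_of_cL (memL hb)] at hne ⊢
    have hk : kL a ≠ kL b := fun he => hne (by rw [he])
    exact Prod.Lex.right _ (Prod.Lex.left _ _ (lt_of_le_of_ne hab hk))
  have pwM : (PySem.List.sorted (ps.filter bML) kML false).Pairwise (fun a b => pvKeyB a < pvKeyB b) := by
    have hle := PySem.List.sorted_pairwise (ps.filter bML) kML
    refine List.Pairwise.imp_of_mem ?_ (hle.and hneM)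
    intro a b ha hb h
    obtain ⟨hab, hne⟩ := h
    rw [key_of_bML (memM ha), key_of_bML (memM hb)] at hne ⊢
    have hk : kML a ≠ kML b := fun he => hne (by rw [he])
    exact Prod.Lex.right _ (Prod.Lex.left _ _ (lt_of_le_of_ne hab hk))
  have pwR : (ps.filter cR).Pairwise (fun a b => pvKeyB a < pvKeyB b) := by
    refine List.Pairwise.imp_of_mem ?_ hneR
    intro a b ha hb h
    exact absurd (by rw [key_of_cR (memR ha), key_of_cR (memR hb)]) h
  have pwO : (PySem.List.sorted (ps.filter cO) (fun x => x) false).Pairwise (fun a b => pvKeyB a < pvKeyB b) := by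
    have hle := PySem.List.sorted_pairwise (ps.filter cO) (fun x => x)
    refine List.Pairwise.imp_of_mem ?_ (hle.and hneO)
    intro a b ha hb h
    obtain ⟨hab, hne⟩ := h
    rw [key_of_cO (memO ha), key_of_cO (memO hb)] at hne ⊢
    have hk : a ≠ b := fun he => hne (by rw [he])
    exact Prod.Lex.right _ (Prod.Lex.right _ (lt_of_le_of_ne hab hk))
  -- assemble strict pairwise across buckets (ranks 0 < 1 < 2 < 3)
  have pwAll : (PySem.List.sorted (ps.filter cL) kL false
      ++ PySem.List.sorted (ps.filter bML) kML false
      ++ ps.filter cR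
      ++ PySem.List.sorted (ps.filter cO) (fun x => x) false).Pairwise (fun a b => pvKeyB a < pvKeyB b) := by
    rw [List.append_assoc, List.append_assoc, List.pairwise_append]
    refine ⟨pwL, ?_, ?_⟩
    · rw [List.pairwise_append]
      refine ⟨pwM, ?_, ?_⟩
      · rw [List.pairwise_append]
        refine ⟨pwR, pwO, ?_⟩
        intro a ha b hb
        rw [key_of_cR (memR ha), key_of_cO (memO hb)]
        exact Prod.Lex.left _ _ (by norm_num)
      · intro a ha b hb
        rw [key_of_bML (memM ha)]
        rcases List.mem_append.mp hb with hb | hb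
        · rw [key_of_cR (memR hb)]
          exact Prod.Lex.left _ _ (by norm_num)
        · rw [key_of_cO (memO hb)]
          exact Prod.Lex.left _ _ (by norm_num)
    · intro a ha b hb
      rw [key_of_cL (memL ha)]
      rcases List.mem_append.mp hb with hb | hb
      · rw [key_of_bML (memM hb)]
        exact Prod.Lex.left _ _ (by norm_num)
      rcases List.mem_append.mp hb with hb | hb
      · rw [key_of_cR (memR hb)]
        exact Prod.Lex.left _ _ (by norm_num)
      · rw [key_of_cO (memO hb)]
        exact Prod.Lex.left _ _ (by norm_num)
  have := PySem.List.sorted_eq_of_perm_of_pairwise_lt _ _ _ hperm pwAll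
  rw [this, List.append_assoc, List.append_assoc]

-- ===== VERDICT (by name: the statement is the Claim_ definition above) =====
set_option maxHeartbeats 1000000 in
theorem sort_lines_spec : Claim_equal_sort_lines := by
  intro lines a m _ hpre
  unfold Pre_sort_lines pvProcessed at hpre
  show sort_lines lines a m = sort_lines_alt lines a m
  simp only [sort_lines, sort_lines_alt,
    filterMap_eq_map_filter metro_norm? is_metro_line normalize_metro_line metro_norm?_eq,
    filterMap_eq_map_filter ml_norm? is_ml_line normalize_ml_line ml_norm?_eq]
  set ps := (if a = true then PySem.Set.ofList (List.map normalize_metro_line (List.filter is_metro_line lines))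
    else if m = true then PySem.Set.ofList (List.map normalize_ml_line (List.filter is_ml_line lines))
    else lines) with hpsdef
  rw [classify_eq]
  rw [sorted_split ps (hpre.imp (fun h => (pvKeyB_ne_iff _ _).mpr h))]
  simp only [List.nil_append]
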